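-- pv_equiv track=rewrite | github.com/NipunaMadhushan/Algorithms | IEEE Xtreme 13.0/Reshuffle Teams.py | minimumChange
-- ===== SOURCE A (Python) =====
-- def addCount(rMem, aMem, team):
--     if rMem == team:
--         if aMem == team:
--             return 0
--         else:
--             return -1
--     else:
--         if aMem == team:
--             return 1
--         else:
--             return 0
--
-- def noOfCounts(S, members, team):
--     length = len(S)
--     count = S[:members].count(team)
--     countList = [count]
--     for x in range(1, length):
--         rMem = S[(x-1) % length]
--         aMem = S[(members+(x-1)) % length]
--         count += addCount(rMem, aMem, team)
--         countList.append(count)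
--
--     return countList
--
-- def minimumChange(S):
--     List = [k1 for k1 in S]
--     length = len(S)
--     teams = ["A", "B", "C", "D"]
--     no_members = []
--     for i in range(4):
--         num = List.count(teams[i])
--         no_members.append(num)
--
--     orders = [[0, 1, 2, 3],
--               [0, 2, 1, 3],
--               [0, 1, 3, 2],
--               [0, 3, 1, 2],
--               [0, 2, 3, 1],
--               [0, 3, 2, 1]]
--
--     countListA = noOfCounts(List, no_members[0], teams[0])
--     countListB = noOfCounts(List, no_members[1], teams[1])
--     countListC = noOfCounts(List, no_members[2], teams[2])
--     countListD = noOfCounts(List, no_members[3], teams[3])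
--     countList = [countListA, countListB, countListC, countListD]
--
--     minimum = length
--     for order in orders:
--         firstL = 0
--         secondL = firstL + no_members[order[0]]
--         thirdL = secondL + no_members[order[1]]
--         fourthL = thirdL + no_members[order[2]]
--
--         for x in range(length):
--             countList1 = countList[order[0]]
--             count1 = countList1[(firstL+x) % length]
--             countList2 = countList[order[1]]
--             count2 = countList2[(secondL+x) % length]
--             countList3 = countList[order[2]]
--             count3 = countList3[(thirdL+x) % length]
--             countList4 = countList[order[3]]
--             count4 = countList4[(fourthL+x) % length]
--
--             total = length - (count1 + count2 + count3 + count4)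
--
--             if total < minimum:
--                 minimum = total
--
--     return minimum
-- ===== SOURCE B (Python) =====
-- def minimumChange(S):
--     lst = list(S)
--     n = len(lst)
--     teams = ["A", "B", "C", "D"]
--     members = [lst.count(t) for t in teams]
--     orders = [[0, 1, 2, 3], [0, 2, 1, 3], [0, 1, 3, 2],
--               [0, 3, 1, 2], [0, 2, 3, 1], [0, 3, 2, 1]]
--     best = n
--     for order in orders:
--         starts = [0, 0, 0, 0]
--         acc = 0
--         for k in order:
--             starts[k] = acc
--             acc += members[k]
--         # scatter pass: the member sitting at position p stays in place exactly for the
--         # rotations x lying in one circular interval of length members[t]; record every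
--         # such interval in a difference array over the unrolled index range [0, 2n)
--         diff = [0] * (2 * n + 1)
--         for p in range(n):
--             c = lst[p]
--             for t in range(4):
--                 if c == teams[t]:
--                     m = members[t]
--                     s = (p + n - starts[t] - m + 1) % n
--                     diff[s] += 1
--                     diff[s + m] -= 1
--         # sweep: running sum of the difference array; a circular interval covers
--         # rotation x iff its unrolled interval covers x or x + n
--         run = []
--         acc2 = 0
--         for y in range(2 * n):
--             acc2 += diff[y]
--             run.append(acc2)
--         for x in range(n):
--             total = n - (run[x] + run[x + n])
--             if total < best:
--                 best = total
--     return best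
-- ===== Notes on version B (the rewrite author's own statement) =====
-- stated objective: alternative
-- what changed: Replaces A's gather-style sliding-window count tables (addCount/noOfCounts queried per rotation) by a scatter-and-sweep algorithm: each member contributes one circular interval of rotations for which it stays in place, recorded in a difference array and summed by a single prefix sweep.
import Mathlib
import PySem

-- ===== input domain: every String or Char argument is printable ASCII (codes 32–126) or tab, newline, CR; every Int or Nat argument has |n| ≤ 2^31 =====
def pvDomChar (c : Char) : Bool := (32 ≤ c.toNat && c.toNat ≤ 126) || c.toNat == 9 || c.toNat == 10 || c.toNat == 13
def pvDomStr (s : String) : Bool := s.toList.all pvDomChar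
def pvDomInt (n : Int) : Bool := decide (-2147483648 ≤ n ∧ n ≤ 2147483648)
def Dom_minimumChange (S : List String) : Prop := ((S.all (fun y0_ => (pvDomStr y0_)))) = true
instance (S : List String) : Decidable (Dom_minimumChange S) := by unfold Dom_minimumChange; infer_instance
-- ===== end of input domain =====

-- B replaces A's gather-style sliding-window count tables (addCount/noOfCounts) by a
-- scatter-and-sweep algorithm: each member contributes one circular interval of rotations
-- (recorded in a difference array), summed by a single prefix sweep; same exact result.

-- ===== PORT A =====
def pvAddCount (rMem aMem team : String) : Int :=
  if rMem = team then (if aMem = team then 0 else -1)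
  else (if aMem = team then 1 else 0)

-- loop `for x in range(1, length)` appending to countList; the two indices are always in
-- range when the loop runs, so `getD ""` is exact for Python's S[i].
def pvNoOfCounts (S : List String) (members : Nat) (team : String) : List Int :=
  let length := S.length
  let count : Int := ((S.take members).count team : Nat)
  ((List.range' 1 (length - 1)).foldl
    (fun (st : List Int × Int) x =>
      let rMem := S.getD ((x - 1) % length) ""
      let aMem := S.getD ((members + (x - 1)) % length) ""
      let c := st.2 + pvAddCount rMem aMem team
      (st.1 ++ [c], c)) ([count], count)).1

def minimumChange (S : List String) : Int :=
  let lst := S.map (fun k1 => k1)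
  let length := S.length
  let teams := ["A", "B", "C", "D"]
  let noMembers := (List.range 4).foldl (fun acc i => acc ++ [lst.count (teams.getD i "")]) []
  let orders : List (List Nat) :=
    [[0, 1, 2, 3], [0, 2, 1, 3], [0, 1, 3, 2], [0, 3, 1, 2], [0, 2, 3, 1], [0, 3, 2, 1]]
  let countListA := pvNoOfCounts lst (noMembers.getD 0 0) (teams.getD 0 "")
  let countListB := pvNoOfCounts lst (noMembers.getD 1 0) (teams.getD 1 "")
  let countListC := pvNoOfCounts lst (noMembers.getD 2 0) (teams.getD 2 "")
  let countListD := pvNoOfCounts lst (noMembers.getD 3 0) (teams.getD 3 "")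
  let countList := [countListA, countListB, countListC, countListD]
  orders.foldl (fun minimum order =>
    let firstL : Nat := 0
    let secondL := firstL + noMembers.getD (order.getD 0 0) 0
    let thirdL := secondL + noMembers.getD (order.getD 1 0) 0
    let fourthL := thirdL + noMembers.getD (order.getD 2 0) 0
    (List.range length).foldl (fun minimum x =>
      let count1 := (countList.getD (order.getD 0 0) []).getD ((firstL + x) % length) 0
      let count2 := (countList.getD (order.getD 1 0) []).getD ((secondL + x) % length) 0
      let count3 := (countList.getD (order.getD 2 0) []).getD ((thirdL + x) % length) 0
      let count4 := (countList.getD (order.getD 3 0) []).getD ((fourthL + x) % length) 0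
      let total := (length : Int) - (count1 + count2 + count3 + count4)
      if total < minimum then total else minimum) minimum) (length : Int)

-- ===== PORT B =====
-- Source B's `starts` loop (`starts = [0]*4; acc = 0; for k in order: starts[k] = acc; acc += members[k]`)
def pvStarts (members : List Nat) (ord : List Nat) : List Nat :=
  (ord.foldl (fun (st : List Nat × Nat) k =>
      (st.1.set k st.2, st.2 + members.getD k 0)) (([0, 0, 0, 0] : List Nat), 0)).1

-- body of Source B's scatter loop (`for t in range(4): if c == teams[t]: …`); Python's
-- `(p + n - starts[t] - m + 1) % n` never has a negative intermediate (starts[t]+m ≤ n),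
-- so plain Nat subtraction is exact here.
def pvScat (S : List String) (members starts : List Nat) (n p : Nat) (d : List Int) (t : Nat) : List Int :=
  if S.getD p "" = (["A", "B", "C", "D"] : List String).getD t "" then
    let m := members.getD t 0
    let s := (p + n - starts.getD t 0 - m + 1) % n
    let d1 := d.set s (d.getD s 0 + 1)
    d1.set (s + m) (d1.getD (s + m) 0 - 1)
  else d

-- Source B's scatter loop: `diff = [0]*(2n+1); for p in range(n): for t in range(4): …`
def pvDiff (S : List String) (members starts : List Nat) (n : Nat) : List Int :=
  (List.range n).foldl (fun d p => (List.range 4).foldl (pvScat S members starts n p) d)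
    (List.replicate (2 * n + 1) (0 : Int))

-- Source B's sweep loop: `run = []; acc2 = 0; for y in range(2n): acc2 += diff[y]; run.append(acc2)`
def pvRun (diff : List Int) (k : Nat) : List Int :=
  ((List.range k).foldl (fun (st : List Int × Int) y =>
      let acc2 := st.2 + diff.getD y 0
      (st.1 ++ [acc2], acc2)) ([], 0)).1

def minimumChange_alt (S : List String) : Int :=
  let n := S.length
  let teams := ["A", "B", "C", "D"]
  let members := teams.map (fun t => S.count t)
  let orders : List (List Nat) :=
    [[0, 1, 2, 3], [0, 2, 1, 3], [0, 1, 3, 2], [0, 3, 1, 2], [0, 2, 3, 1], [0, 3, 2, 1]]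
  orders.foldl (fun best order =>
    let starts := pvStarts members order
    let diff := pvDiff S members starts n
    let run := pvRun diff (2 * n)
    (List.range n).foldl (fun best x =>
        let total := (n : Int) - (run.getD x 0 + run.getD (x + n) 0)
        if total < best then total else best) best) (n : Int)

-- ===== PRECONDITION & SPEC =====
def Spec_minimumChange (S : List String) (out : Int) : Prop := out = minimumChange_alt S
instance (S : List String) (out : Int) : Decidable (Spec_minimumChange S out) := by unfold Spec_minimumChange; infer_instance

-- ===== CLAIM (what is proved, stated in full; the proofs are below) =====
def Claim_equal_minimumChange : Prop := ∀ (S : List String), Dom_minimumChange S → Spec_minimumChange S (minimumChange S)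

-- ===== LEMMAS AND PROOFS =====
-- proof-side definitions
def pvInd (S : List String) (t : String) (j : Nat) : Int :=
  if S.getD (j % S.length) "" = t then 1 else 0

def pvCw (S : List String) (t : String) (p m : Nat) : Int :=
  ∑ i ∈ Finset.range m, pvInd S t (p + i)

-- prefix sum of length y over a difference array
def pvPS (d : List Int) (y : Nat) : Int := ∑ u ∈ Finset.range y, d.getD u 0

-- contribution of scatter step (p, t) to the prefix sum of length y
def pvDelta (S : List String) (members starts : List Nat) (n p t y : Nat) : Int :=
  if S.getD p "" = (["A", "B", "C", "D"] : List String).getD t "" then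
    (let m := members.getD t 0
     let s := (p + n - starts.getD t 0 - m + 1) % n
     (if s < y then (1 : Int) else 0) - (if s + m < y then 1 else 0))
  else 0

-- ---- A-side lemmas ----
lemma pvCw_slide (S : List String) (t : String) (p m : Nat) :
    pvCw S t (p + 1) m = pvCw S t p m + pvInd S t (p + m) - pvInd S t p := by
  unfold pvCw
  have h1 := Finset.sum_range_succ (fun i => pvInd S t (p + i)) m
  have h2 := Finset.sum_range_succ' (fun i => pvInd S t (p + i)) m
  have h3 : (∑ i ∈ Finset.range m, pvInd S t (p + (i + 1)))
      = ∑ i ∈ Finset.range m, pvInd S t (p + 1 + i) := by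
    apply Finset.sum_congr rfl; intro i _; congr 1; omega
  simp only [h3] at h2
  simp only [Nat.add_zero] at h2
  linarith

lemma pvTakeCount (S : List String) (t : String) :
    ∀ m, m ≤ S.length → (((S.take m).count t : Nat) : Int) = pvCw S t 0 m := by
  intro m
  induction m with
  | zero => intro _; simp [pvCw]
  | succ m ih =>
    intro hm
    have hmlt : m < S.length := by omega
    rw [List.take_succ]
    have hg : S[m]? = some (S.getD m "") := by
      rw [List.getElem?_eq_getElem hmlt, List.getD_eq_getElem _ _ hmlt]
    rw [hg]
    unfold pvCw
    rw [Finset.sum_range_succ]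
    have hind : pvInd S t (0 + m) = if S.getD m "" = t then 1 else 0 := by
      unfold pvInd
      rw [Nat.zero_add, Nat.mod_eq_of_lt hmlt]
    rw [hind]
    rw [List.count_append]
    push_cast
    rw [ih (by omega)]
    unfold pvCw
    by_cases h : S.getD m "" = t <;> simp [h, List.count_cons]

lemma pvAddCount_eq (S : List String) (t : String) (k m : Nat) :
    pvAddCount (S.getD (k % S.length) "") (S.getD ((m + k) % S.length) "") t
      = pvInd S t (k + m) - pvInd S t k := by
  unfold pvAddCount pvInd
  rw [show m + k = k + m from by omega]
  split_ifs <;> norm_num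

lemma pvLoopA (S : List String) (t : String) (m : Nat) : ∀ k,
    (List.range' 1 k).foldl
      (fun (st : List Int × Int) x =>
        let rMem := S.getD ((x - 1) % S.length) ""
        let aMem := S.getD ((m + (x - 1)) % S.length) ""
        let c := st.2 + pvAddCount rMem aMem t
        (st.1 ++ [c], c)) ([pvCw S t 0 m], pvCw S t 0 m)
    = ((List.range (k + 1)).map (fun x => pvCw S t x m), pvCw S t k m) := by
  intro k
  induction k with
  | zero => simp
  | succ k ih =>
    rw [List.range'_1_concat, List.foldl_append, ih]
    simp only [List.foldl_cons, List.foldl_nil]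
    have h1 : 1 + k - 1 = k := by omega
    rw [h1, pvAddCount_eq S t k m]
    have h2 : pvCw S t k m + (pvInd S t (k + m) - pvInd S t k) = pvCw S t (k + 1) m := by
      rw [pvCw_slide]; ring
    rw [h2, List.range_succ (n := k + 1), List.map_append]
    simp

lemma pvNoOfCounts_eq (S : List String) (t : String) (m : Nat)
    (hm : m ≤ S.length) (hL : 1 ≤ S.length) :
    pvNoOfCounts S m t = (List.range S.length).map (fun x => pvCw S t x m) := by
  unfold pvNoOfCounts
  simp only
  rw [pvTakeCount S t m hm, pvLoopA S t m (S.length - 1)]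
  rw [show S.length - 1 + 1 = S.length from by omega]

lemma pvSum4 (S : List String) :
    S.count "A" + S.count "B" + S.count "C" + S.count "D" ≤ S.length := by
  induction S with
  | nil => simp
  | cons h tl ih =>
    simp only [List.count_cons, List.length_cons]
    by_cases h1 : h = "A" <;> by_cases h2 : h = "B" <;> by_cases h3 : h = "C" <;>
      by_cases h4 : h = "D" <;> simp_all <;> omega

lemma pvCntLookup (S : List String) (t : String) (m q : Nat) (hq : q < S.length) :
    ((List.range S.length).map (fun x => pvCw S t x m)).getD q 0 = pvCw S t q m := by
  rw [PySem.List.getD_map_range _ _ _ _ hq]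

-- ---- B-side lemmas ----
lemma getD_set' (d : List Int) (i u : Nat) (v : Int) (h : i < d.length) :
    (d.set i v).getD u 0 = if u = i then v else d.getD u 0 := by
  rw [List.getD_eq_getElem?_getD, List.getElem?_set]
  by_cases hu : u = i
  · simp [hu, h]
  · simp [hu, Ne.symm hu, List.getD_eq_getElem?_getD]

lemma pvPS_set (d : List Int) (i : Nat) (v : Int) (y : Nat) (hi : i < d.length) :
    pvPS (d.set i v) y = pvPS d y + (if i < y then v - d.getD i 0 else 0) := by
  unfold pvPS
  have h1 : ∀ u ∈ Finset.range y, (d.set i v).getD u 0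
      = d.getD u 0 + (if u = i then v - d.getD i 0 else 0) := by
    intro u _
    rw [getD_set' d i u v hi]
    by_cases hu : u = i <;> simp [hu]
  rw [Finset.sum_congr rfl h1, Finset.sum_add_distrib,
    Finset.sum_ite_eq' (Finset.range y) i (fun _ => v - d.getD i 0)]
  simp [Finset.mem_range]

lemma pvScat_PS (S : List String) (members starts : List Nat) (n p : Nat)
    (d : List Int) (t : Nat) (hd : d.length = 2 * n + 1) (hn : 1 ≤ n)
    (hm : members.getD t 0 ≤ n) :
    (pvScat S members starts n p d t).length = 2 * n + 1 ∧
      ∀ y, pvPS (pvScat S members starts n p d t) y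
        = pvPS d y + pvDelta S members starts n p t y := by
  unfold pvScat pvDelta
  by_cases hc : S.getD p "" = (["A", "B", "C", "D"] : List String).getD t "" <;>
    simp only [hc, if_true, if_false]
  · set m := members.getD t 0 with hmdef
    set s := (p + n - starts.getD t 0 - m + 1) % n with hsdef
    have hs : s < n := Nat.mod_lt _ (by omega)
    have hs1 : s < d.length := by omega
    have hs2 : s + m < (d.set s (d.getD s 0 + 1)).length := by
      rw [List.length_set]; omega
    refine ⟨by simp [List.length_set, hd], fun y => ?_⟩
    rw [pvPS_set _ _ _ _ hs2, pvPS_set _ _ _ _ hs1]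
    have : (d.set s (d.getD s 0 + 1)).getD (s + m) 0 - 1
        - (d.set s (d.getD s 0 + 1)).getD (s + m) 0 = -1 := by ring
    rw [this]
    split_ifs <;> ring
  · exact ⟨hd, fun y => by ring⟩

lemma pvInner (S : List String) (members starts : List Nat) (n p : Nat)
    (d : List Int) (hd : d.length = 2 * n + 1) (hn : 1 ≤ n)
    (hm : ∀ t, members.getD t 0 ≤ n) :
    ((List.range 4).foldl (pvScat S members starts n p) d).length = 2 * n + 1 ∧
      ∀ y, pvPS ((List.range 4).foldl (pvScat S members starts n p) d) y
        = pvPS d y + ∑ t ∈ Finset.range 4, pvDelta S members starts n p t y := by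
  have h0 := pvScat_PS S members starts n p d 0 hd hn (hm 0)
  have h1 := pvScat_PS S members starts n p _ 1 h0.1 hn (hm 1)
  have h2 := pvScat_PS S members starts n p _ 2 h1.1 hn (hm 2)
  have h3 := pvScat_PS S members starts n p _ 3 h2.1 hn (hm 3)
  rw [show List.range 4 = [0, 1, 2, 3] from rfl]
  simp only [List.foldl_cons, List.foldl_nil]
  refine ⟨h3.1, fun y => ?_⟩
  rw [h3.2, h2.2, h1.2, h0.2]
  simp [Finset.sum_range_succ]
  ring

lemma pvDiffFold (S : List String) (members starts : List Nat) (n : Nat)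
    (hn : 1 ≤ n) (hm : ∀ t, members.getD t 0 ≤ n) (k : Nat) :
    ((List.range k).foldl (fun d p => (List.range 4).foldl (pvScat S members starts n p) d)
        (List.replicate (2 * n + 1) (0 : Int))).length = 2 * n + 1 ∧
      ∀ y, pvPS ((List.range k).foldl
            (fun d p => (List.range 4).foldl (pvScat S members starts n p) d)
            (List.replicate (2 * n + 1) (0 : Int))) y
        = ∑ p ∈ Finset.range k, ∑ t ∈ Finset.range 4, pvDelta S members starts n p t y := by
  induction k with
  | zero =>
    refine ⟨by simp, fun y => ?_⟩
    simp only [List.range_zero, List.foldl_nil, Finset.range_zero, Finset.sum_empty]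
    unfold pvPS
    apply Finset.sum_eq_zero
    intro u _
    by_cases hu : u < 2 * n + 1
    · simp [List.getD_eq_getElem?_getD, hu]
    · rw [List.getD_eq_default]; simp; omega
  | succ k ih =>
    rw [show List.range (k + 1) = List.range k ++ [k] from List.range_succ, List.foldl_append]
    simp only [List.foldl_cons, List.foldl_nil]
    have hinner := pvInner S members starts n k _ ih.1 hn hm
    refine ⟨hinner.1, fun y => ?_⟩
    rw [hinner.2 y, ih.2 y]
    simp [Finset.sum_range_succ]

lemma pvRunFold (diff : List Int) (k : Nat) :
    (List.range k).foldl (fun (st : List Int × Int) y =>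
        let acc2 := st.2 + diff.getD y 0
        (st.1 ++ [acc2], acc2)) ([], 0)
      = ((List.range k).map (fun y => pvPS diff (y + 1)), pvPS diff k) := by
  induction k with
  | zero => simp [pvPS]
  | succ k ih =>
    rw [show List.range (k + 1) = List.range k ++ [k] from List.range_succ, List.foldl_append, ih]
    simp only [List.foldl_cons, List.foldl_nil, List.map_append, List.map_cons, List.map_nil]
    refine Prod.ext ?_ ?_
    · show _ ++ [pvPS diff k + diff.getD k 0] = _
      congr 1
      simp only [List.cons.injEq, and_true]
      rw [pvPS, pvPS, Finset.sum_range_succ]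
    · show pvPS diff k + diff.getD k 0 = pvPS diff (k + 1)
      rw [pvPS, pvPS, Finset.sum_range_succ]

lemma pvRun_eq (diff : List Int) (k : Nat) :
    pvRun diff k = (List.range k).map (fun y => pvPS diff (y + 1)) := by
  unfold pvRun
  rw [pvRunFold]

lemma pvDelta_circ (n p x L m : Nat) (hp : p < n) (hx : x < n) (h1 : 1 ≤ m)
    (hLm : L + m ≤ n) :
    (((if (p + n - L - m + 1) % n < x + 1 then (1 : Int) else 0)
        - (if (p + n - L - m + 1) % n + m < x + 1 then 1 else 0))
      + ((if (p + n - L - m + 1) % n < x + n + 1 then (1 : Int) else 0)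
        - (if (p + n - L - m + 1) % n + m < x + n + 1 then 1 else 0)))
    = if (L ≤ (p + n - x) % n ∧ (p + n - x) % n < L + m) then 1 else 0 := by
  have hA : p + n - L - m + 1 < 2 * n := by omega
  have hB : p + n - x < 2 * n := by omega
  have e1 : (p + n - L - m + 1) % n
      = if p + n - L - m + 1 < n then p + n - L - m + 1 else p + n - L - m + 1 - n := by
    split_ifs with h
    · exact Nat.mod_eq_of_lt h
    · rw [Nat.mod_eq_sub_mod (by omega), Nat.mod_eq_of_lt (by omega)]
  have e2 : (p + n - x) % n
      = if p + n - x < n then p + n - x else p + n - x - n := by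
    split_ifs with h
    · exact Nat.mod_eq_of_lt h
    · rw [Nat.mod_eq_sub_mod (by omega), Nat.mod_eq_of_lt (by omega)]
  rw [e1, e2]
  split_ifs <;> omega

lemma pvKey (n p x L m : Nat) (hp : p < n) (hx : x < n) (hLm : L + m < n) :
    (p + n - x) % n = L + m ↔ p = (x + L + m) % n := by
  have hv : (p + n - x) % n = p + n - x ∨ ((p + n - x) % n = p + n - x - n ∧ n ≤ p + n - x) := by
    rcases Nat.lt_or_ge (p + n - x) n with h | h
    · left; exact Nat.mod_eq_of_lt h
    · right; exact ⟨by rw [Nat.mod_eq_sub_mod h, Nat.mod_eq_of_lt (by omega)], h⟩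
  have hw : (x + L + m) % n = x + L + m ∨ ((x + L + m) % n = x + L + m - n ∧ n ≤ x + L + m) := by
    rcases Nat.lt_or_ge (x + L + m) n with h | h
    · left; exact Nat.mod_eq_of_lt h
    · right; exact ⟨by rw [Nat.mod_eq_sub_mod h, Nat.mod_eq_of_lt (by omega)], h⟩
  have hv2 : (p + n - x) % n < n := Nat.mod_lt _ (by omega)
  have hw2 : (x + L + m) % n < n := Nat.mod_lt _ (by omega)
  rcases hv with hv | ⟨hv, hv3⟩ <;> rcases hw with hw | ⟨hw, hw3⟩ <;>
    (rw [hv] at hv2; rw [hw] at hw2; rw [hv, hw]; omega)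

lemma pvCircSum (S : List String) (t : String) (x L : Nat) : ∀ m,
    x < S.length → L + m ≤ S.length →
    (∑ p ∈ Finset.range S.length,
        if (S.getD p "" = t ∧ L ≤ (p + S.length - x) % S.length
            ∧ (p + S.length - x) % S.length < L + m) then (1 : Int) else 0)
      = pvCw S t ((L + x) % S.length) m := by
  intro m
  induction m with
  | zero =>
    intro hx hLm
    rw [show pvCw S t ((L + x) % S.length) 0 = 0 from by simp [pvCw]]
    apply Finset.sum_eq_zero
    intro p _
    rw [if_neg]; omega
  | succ m ih =>
    intro hx hLm
    have hn : 1 ≤ S.length := by omega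
    have hLm' : L + m < S.length := by omega
    have h1 : ∀ p ∈ Finset.range S.length,
        (if (S.getD p "" = t ∧ L ≤ (p + S.length - x) % S.length
            ∧ (p + S.length - x) % S.length < L + (m + 1)) then (1 : Int) else 0)
        = (if (S.getD p "" = t ∧ L ≤ (p + S.length - x) % S.length
            ∧ (p + S.length - x) % S.length < L + m) then (1 : Int) else 0)
          + (if p = (x + L + m) % S.length then
              (if S.getD p "" = t then (1 : Int) else 0) else 0) := by
      intro p hp
      have hpn : p < S.length := Finset.mem_range.mp hp
      have hiff := pvKey S.length p x L m hpn hx hLm'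
      by_cases hc : S.getD p "" = t
      · simp only [hc, true_and, if_true]
        simp only [← hiff]
        split_ifs <;> omega
      · rw [if_neg (fun h => hc h.1), if_neg (fun h => hc h.1), if_neg hc]
        simp
    rw [Finset.sum_congr rfl h1, Finset.sum_add_distrib]
    rw [Finset.sum_ite_eq' (Finset.range S.length) ((x + L + m) % S.length)
      (fun p => if S.getD p "" = t then (1 : Int) else 0)]
    rw [ih hx (by omega)]
    have hmem : (x + L + m) % S.length ∈ Finset.range S.length := by
      exact Finset.mem_range.mpr (Nat.mod_lt _ (by omega))
    rw [if_pos hmem]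
    show pvCw S t ((L + x) % S.length) m + _ = pvCw S t ((L + x) % S.length) (m + 1)
    unfold pvCw
    rw [Finset.sum_range_succ]
    congr 1
    unfold pvInd
    rw [Nat.mod_add_mod, show L + x + m = x + L + m from by ring]

lemma pvPair (S : List String) (starts : List Nat) (p x t : Nat) (tm : String)
    (hp : p < S.length) (hx : x < S.length)
    (htm : (["A", "B", "C", "D"] : List String).getD t "" = tm)
    (hmt : ([S.count "A", S.count "B", S.count "C", S.count "D"] : List Nat).getD t 0
      = S.count tm)
    (hLm : starts.getD t 0 + S.count tm ≤ S.length) :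
    pvDelta S [S.count "A", S.count "B", S.count "C", S.count "D"] starts S.length p t (x + 1)
      + pvDelta S [S.count "A", S.count "B", S.count "C", S.count "D"] starts S.length p t
          (x + S.length + 1)
    = if (S.getD p "" = tm ∧ starts.getD t 0 ≤ (p + S.length - x) % S.length
          ∧ (p + S.length - x) % S.length < starts.getD t 0 + S.count tm)
        then (1 : Int) else 0 := by
  unfold pvDelta
  rw [htm, hmt]
  by_cases hc : S.getD p "" = tm
  · rw [if_pos hc, if_pos hc]
    rw [if_congr (show (S.getD p "" = tm ∧ starts.getD t 0 ≤ (p + S.length - x) % S.length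
          ∧ (p + S.length - x) % S.length < starts.getD t 0 + S.count tm)
        ↔ (starts.getD t 0 ≤ (p + S.length - x) % S.length
          ∧ (p + S.length - x) % S.length < starts.getD t 0 + S.count tm)
        from and_iff_right hc) rfl rfl]
    have hmem : tm ∈ S := by
      rw [← hc, List.getD_eq_getElem _ _ hp]
      exact List.getElem_mem hp
    have h1 : 1 ≤ S.count tm := List.count_pos_iff.mpr hmem
    exact pvDelta_circ S.length p x (starts.getD t 0) (S.count tm) hp hx h1 hLm
  · rw [if_neg hc, if_neg hc, if_neg (fun h => hc h.1)]
    ring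

lemma pvBsum (S : List String) (starts : List Nat) (x : Nat)
    (hn : 1 ≤ S.length) (hx : x < S.length)
    (h0 : starts.getD 0 0 + S.count "A" ≤ S.length)
    (h1 : starts.getD 1 0 + S.count "B" ≤ S.length)
    (h2 : starts.getD 2 0 + S.count "C" ≤ S.length)
    (h3 : starts.getD 3 0 + S.count "D" ≤ S.length) :
    pvPS (pvDiff S [S.count "A", S.count "B", S.count "C", S.count "D"] starts S.length) (x + 1)
      + pvPS (pvDiff S [S.count "A", S.count "B", S.count "C", S.count "D"] starts S.length)
          (x + S.length + 1)
    = pvCw S "A" ((starts.getD 0 0 + x) % S.length) (S.count "A")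
      + pvCw S "B" ((starts.getD 1 0 + x) % S.length) (S.count "B")
      + pvCw S "C" ((starts.getD 2 0 + x) % S.length) (S.count "C")
      + pvCw S "D" ((starts.getD 3 0 + x) % S.length) (S.count "D") := by
  have hmem : ∀ t : Nat,
      ([S.count "A", S.count "B", S.count "C", S.count "D"] : List Nat).getD t 0 ≤ S.length := by
    intro t
    rcases t with _ | _ | _ | _ | t
    · exact List.count_le_length
    · exact List.count_le_length
    · exact List.count_le_length
    · exact List.count_le_length
    · simp [List.getD]
  have hDF := pvDiffFold S [S.count "A", S.count "B", S.count "C", S.count "D"] starts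
    S.length hn hmem S.length
  rw [show pvPS (pvDiff S [S.count "A", S.count "B", S.count "C", S.count "D"] starts S.length)
        (x + 1) = _ from hDF.2 (x + 1),
      show pvPS (pvDiff S [S.count "A", S.count "B", S.count "C", S.count "D"] starts S.length)
        (x + S.length + 1) = _ from hDF.2 (x + S.length + 1)]
  rw [← Finset.sum_add_distrib]
  have hpt : ∀ p ∈ Finset.range S.length,
      ((∑ t ∈ Finset.range 4,
          pvDelta S [S.count "A", S.count "B", S.count "C", S.count "D"] starts S.length p t (x + 1))
        + ∑ t ∈ Finset.range 4,
            pvDelta S [S.count "A", S.count "B", S.count "C", S.count "D"] starts S.length p t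
              (x + S.length + 1))
      = (if (S.getD p "" = "A" ∧ starts.getD 0 0 ≤ (p + S.length - x) % S.length
            ∧ (p + S.length - x) % S.length < starts.getD 0 0 + S.count "A") then (1 : Int) else 0)
        + (if (S.getD p "" = "B" ∧ starts.getD 1 0 ≤ (p + S.length - x) % S.length
            ∧ (p + S.length - x) % S.length < starts.getD 1 0 + S.count "B") then (1 : Int) else 0)
        + (if (S.getD p "" = "C" ∧ starts.getD 2 0 ≤ (p + S.length - x) % S.length
            ∧ (p + S.length - x) % S.length < starts.getD 2 0 + S.count "C") then (1 : Int) else 0)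
        + (if (S.getD p "" = "D" ∧ starts.getD 3 0 ≤ (p + S.length - x) % S.length
            ∧ (p + S.length - x) % S.length < starts.getD 3 0 + S.count "D") then (1 : Int) else 0) := by
    intro p hp
    have hpn : p < S.length := Finset.mem_range.mp hp
    have e0 := pvPair S starts p x 0 "A" hpn hx rfl rfl h0
    have e1 := pvPair S starts p x 1 "B" hpn hx rfl rfl h1
    have e2 := pvPair S starts p x 2 "C" hpn hx rfl rfl h2
    have e3 := pvPair S starts p x 3 "D" hpn hx rfl rfl h3
    simp only [Finset.sum_range_succ, Finset.sum_range_zero, zero_add]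
    linarith
  rw [Finset.sum_congr rfl hpt]
  rw [Finset.sum_add_distrib, Finset.sum_add_distrib, Finset.sum_add_distrib]
  rw [pvCircSum S "A" x (starts.getD 0 0) (S.count "A") hx h0,
      pvCircSum S "B" x (starts.getD 1 0) (S.count "B") hx h1,
      pvCircSum S "C" x (starts.getD 2 0) (S.count "C") hx h2,
      pvCircSum S "D" x (starts.getD 3 0) (S.count "D") hx h3]

lemma pvIfMin (a b acc : Int) (h : a = b) :
    (if a < acc then a else acc) = (if b < acc then b else acc) := by
  rw [h]

-- ===== VERDICT (by name: the statement is the Claim_ definition above) =====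
theorem minimumChange_spec : Claim_equal_minimumChange := by
  unfold Claim_equal_minimumChange Spec_minimumChange
  intro S _
  by_cases h0 : S = []
  · subst h0; rfl
  have hL : 1 ≤ S.length := by
    cases S with | nil => simp at h0 | cons a l => simp
  have hs := pvSum4 S
  unfold minimumChange minimumChange_alt
  simp only [List.map_id']
  have hnm : (List.range 4).foldl
      (fun acc i => acc ++ [S.count ((["A", "B", "C", "D"] : List String).getD i "")]) []
      = [S.count "A", S.count "B", S.count "C", S.count "D"] := rfl
  rw [hnm]
  simp only [List.map_cons, List.map_nil, List.getD_cons_zero, List.getD_cons_succ,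
    show ∀ α (a b c d : α) (e : α), ([a,b,c,d] : List α).getD 1 e = b from fun _ _ _ _ _ _ => rfl,
    show ∀ α (a b c d : α) (e : α), ([a,b,c,d] : List α).getD 2 e = c from fun _ _ _ _ _ _ => rfl,
    show ∀ α (a b c d : α) (e : α), ([a,b,c,d] : List α).getD 3 e = d from fun _ _ _ _ _ _ => rfl]
  rw [pvNoOfCounts_eq S "A" _ (List.count_le_length) hL,
      pvNoOfCounts_eq S "B" _ (List.count_le_length) hL,
      pvNoOfCounts_eq S "C" _ (List.count_le_length) hL,
      pvNoOfCounts_eq S "D" _ (List.count_le_length) hL]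
  apply PySem.List.foldl_congr_mem
  intro acc order hord
  fin_cases hord
  · -- order [0, 1, 2, 3]
    simp only [List.getD_cons_zero,
      show ∀ (α : Type) (a b c d e : α), ([a,b,c,d] : List α).getD 1 e = b from fun _ _ _ _ _ _ => rfl,
      show ∀ (α : Type) (a b c d e : α), ([a,b,c,d] : List α).getD 2 e = c from fun _ _ _ _ _ _ => rfl,
      show ∀ (α : Type) (a b c d e : α), ([a,b,c,d] : List α).getD 3 e = d from fun _ _ _ _ _ _ => rfl,
      show pvStarts [S.count "A", S.count "B", S.count "C", S.count "D"] [0, 1, 2, 3]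
        = [0, 0 + S.count "A", 0 + S.count "A" + S.count "B", 0 + S.count "A" + S.count "B" + S.count "C"] from rfl]
    apply PySem.List.foldl_congr_mem
    intro acc2 x hx
    have hxl : x < S.length := List.mem_range.mp hx
    rw [pvRun_eq,
        PySem.List.getD_map_range _ _ _ _ (show x < 2 * S.length by omega),
        PySem.List.getD_map_range _ _ _ _ (show x + S.length < 2 * S.length by omega)]
    rw [pvCntLookup S "A" _ _ (Nat.mod_lt _ (by omega)),
        pvCntLookup S "B" _ _ (Nat.mod_lt _ (by omega)),
        pvCntLookup S "C" _ _ (Nat.mod_lt _ (by omega)),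
        pvCntLookup S "D" _ _ (Nat.mod_lt _ (by omega))]
    have hb := pvBsum S [0, 0 + S.count "A", 0 + S.count "A" + S.count "B", 0 + S.count "A" + S.count "B" + S.count "C"] x hL hxl
      (by simp only [List.getD_cons_zero]; omega)
      (by simp only [show ∀ (α : Type) (a b c d e : α), ([a,b,c,d] : List α).getD 1 e = b
            from fun _ _ _ _ _ _ => rfl]; omega)
      (by simp only [show ∀ (α : Type) (a b c d e : α), ([a,b,c,d] : List α).getD 2 e = c
            from fun _ _ _ _ _ _ => rfl]; omega)
      (by simp only [show ∀ (α : Type) (a b c d e : α), ([a,b,c,d] : List α).getD 3 e = d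
            from fun _ _ _ _ _ _ => rfl]; omega)
    simp only [List.getD_cons_zero,
      show ∀ (α : Type) (a b c d e : α), ([a,b,c,d] : List α).getD 1 e = b from fun _ _ _ _ _ _ => rfl,
      show ∀ (α : Type) (a b c d e : α), ([a,b,c,d] : List α).getD 2 e = c from fun _ _ _ _ _ _ => rfl,
      show ∀ (α : Type) (a b c d e : α), ([a,b,c,d] : List α).getD 3 e = d from fun _ _ _ _ _ _ => rfl]
      at hb
    apply pvIfMin
    linarith [hb]
  · -- order [0, 2, 1, 3]
    simp only [List.getD_cons_zero,
      show ∀ (α : Type) (a b c d e : α), ([a,b,c,d] : List α).getD 1 e = b from fun _ _ _ _ _ _ => rfl,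
      show ∀ (α : Type) (a b c d e : α), ([a,b,c,d] : List α).getD 2 e = c from fun _ _ _ _ _ _ => rfl,
      show ∀ (α : Type) (a b c d e : α), ([a,b,c,d] : List α).getD 3 e = d from fun _ _ _ _ _ _ => rfl,
      show pvStarts [S.count "A", S.count "B", S.count "C", S.count "D"] [0, 2, 1, 3]
        = [0, 0 + S.count "A" + S.count "C", 0 + S.count "A", 0 + S.count "A" + S.count "C" + S.count "B"] from rfl]
    apply PySem.List.foldl_congr_mem
    intro acc2 x hx
    have hxl : x < S.length := List.mem_range.mp hx
    rw [pvRun_eq,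
        PySem.List.getD_map_range _ _ _ _ (show x < 2 * S.length by omega),
        PySem.List.getD_map_range _ _ _ _ (show x + S.length < 2 * S.length by omega)]
    rw [pvCntLookup S "A" _ _ (Nat.mod_lt _ (by omega)),
        pvCntLookup S "B" _ _ (Nat.mod_lt _ (by omega)),
        pvCntLookup S "C" _ _ (Nat.mod_lt _ (by omega)),
        pvCntLookup S "D" _ _ (Nat.mod_lt _ (by omega))]
    have hb := pvBsum S [0, 0 + S.count "A" + S.count "C", 0 + S.count "A", 0 + S.count "A" + S.count "C" + S.count "B"] x hL hxl
      (by simp only [List.getD_cons_zero]; omega)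
      (by simp only [show ∀ (α : Type) (a b c d e : α), ([a,b,c,d] : List α).getD 1 e = b
            from fun _ _ _ _ _ _ => rfl]; omega)
      (by simp only [show ∀ (α : Type) (a b c d e : α), ([a,b,c,d] : List α).getD 2 e = c
            from fun _ _ _ _ _ _ => rfl]; omega)
      (by simp only [show ∀ (α : Type) (a b c d e : α), ([a,b,c,d] : List α).getD 3 e = d
            from fun _ _ _ _ _ _ => rfl]; omega)
    simp only [List.getD_cons_zero,
      show ∀ (α : Type) (a b c d e : α), ([a,b,c,d] : List α).getD 1 e = b from fun _ _ _ _ _ _ => rfl,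
      show ∀ (α : Type) (a b c d e : α), ([a,b,c,d] : List α).getD 2 e = c from fun _ _ _ _ _ _ => rfl,
      show ∀ (α : Type) (a b c d e : α), ([a,b,c,d] : List α).getD 3 e = d from fun _ _ _ _ _ _ => rfl]
      at hb
    apply pvIfMin
    linarith [hb]
  · -- order [0, 1, 3, 2]
    simp only [List.getD_cons_zero,
      show ∀ (α : Type) (a b c d e : α), ([a,b,c,d] : List α).getD 1 e = b from fun _ _ _ _ _ _ => rfl,
      show ∀ (α : Type) (a b c d e : α), ([a,b,c,d] : List α).getD 2 e = c from fun _ _ _ _ _ _ => rfl,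
      show ∀ (α : Type) (a b c d e : α), ([a,b,c,d] : List α).getD 3 e = d from fun _ _ _ _ _ _ => rfl,
      show pvStarts [S.count "A", S.count "B", S.count "C", S.count "D"] [0, 1, 3, 2]
        = [0, 0 + S.count "A", 0 + S.count "A" + S.count "B" + S.count "D", 0 + S.count "A" + S.count "B"] from rfl]
    apply PySem.List.foldl_congr_mem
    intro acc2 x hx
    have hxl : x < S.length := List.mem_range.mp hx
    rw [pvRun_eq,
        PySem.List.getD_map_range _ _ _ _ (show x < 2 * S.length by omega),
        PySem.List.getD_map_range _ _ _ _ (show x + S.length < 2 * S.length by omega)]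
    rw [pvCntLookup S "A" _ _ (Nat.mod_lt _ (by omega)),
        pvCntLookup S "B" _ _ (Nat.mod_lt _ (by omega)),
        pvCntLookup S "C" _ _ (Nat.mod_lt _ (by omega)),
        pvCntLookup S "D" _ _ (Nat.mod_lt _ (by omega))]
    have hb := pvBsum S [0, 0 + S.count "A", 0 + S.count "A" + S.count "B" + S.count "D", 0 + S.count "A" + S.count "B"] x hL hxl
      (by simp only [List.getD_cons_zero]; omega)
      (by simp only [show ∀ (α : Type) (a b c d e : α), ([a,b,c,d] : List α).getD 1 e = b
            from fun _ _ _ _ _ _ => rfl]; omega)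
      (by simp only [show ∀ (α : Type) (a b c d e : α), ([a,b,c,d] : List α).getD 2 e = c
            from fun _ _ _ _ _ _ => rfl]; omega)
      (by simp only [show ∀ (α : Type) (a b c d e : α), ([a,b,c,d] : List α).getD 3 e = d
            from fun _ _ _ _ _ _ => rfl]; omega)
    simp only [List.getD_cons_zero,
      show ∀ (α : Type) (a b c d e : α), ([a,b,c,d] : List α).getD 1 e = b from fun _ _ _ _ _ _ => rfl,
      show ∀ (α : Type) (a b c d e : α), ([a,b,c,d] : List α).getD 2 e = c from fun _ _ _ _ _ _ => rfl,
      show ∀ (α : Type) (a b c d e : α), ([a,b,c,d] : List α).getD 3 e = d from fun _ _ _ _ _ _ => rfl]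
      at hb
    apply pvIfMin
    linarith [hb]
  · -- order [0, 3, 1, 2]
    simp only [List.getD_cons_zero,
      show ∀ (α : Type) (a b c d e : α), ([a,b,c,d] : List α).getD 1 e = b from fun _ _ _ _ _ _ => rfl,
      show ∀ (α : Type) (a b c d e : α), ([a,b,c,d] : List α).getD 2 e = c from fun _ _ _ _ _ _ => rfl,
      show ∀ (α : Type) (a b c d e : α), ([a,b,c,d] : List α).getD 3 e = d from fun _ _ _ _ _ _ => rfl,
      show pvStarts [S.count "A", S.count "B", S.count "C", S.count "D"] [0, 3, 1, 2]
        = [0, 0 + S.count "A" + S.count "D", 0 + S.count "A" + S.count "D" + S.count "B", 0 + S.count "A"] from rfl]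
    apply PySem.List.foldl_congr_mem
    intro acc2 x hx
    have hxl : x < S.length := List.mem_range.mp hx
    rw [pvRun_eq,
        PySem.List.getD_map_range _ _ _ _ (show x < 2 * S.length by omega),
        PySem.List.getD_map_range _ _ _ _ (show x + S.length < 2 * S.length by omega)]
    rw [pvCntLookup S "A" _ _ (Nat.mod_lt _ (by omega)),
        pvCntLookup S "B" _ _ (Nat.mod_lt _ (by omega)),
        pvCntLookup S "C" _ _ (Nat.mod_lt _ (by omega)),
        pvCntLookup S "D" _ _ (Nat.mod_lt _ (by omega))]
    have hb := pvBsum S [0, 0 + S.count "A" + S.count "D", 0 + S.count "A" + S.count "D" + S.count "B", 0 + S.count "A"] x hL hxl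
      (by simp only [List.getD_cons_zero]; omega)
      (by simp only [show ∀ (α : Type) (a b c d e : α), ([a,b,c,d] : List α).getD 1 e = b
            from fun _ _ _ _ _ _ => rfl]; omega)
      (by simp only [show ∀ (α : Type) (a b c d e : α), ([a,b,c,d] : List α).getD 2 e = c
            from fun _ _ _ _ _ _ => rfl]; omega)
      (by simp only [show ∀ (α : Type) (a b c d e : α), ([a,b,c,d] : List α).getD 3 e = d
            from fun _ _ _ _ _ _ => rfl]; omega)
    simp only [List.getD_cons_zero,
      show ∀ (α : Type) (a b c d e : α), ([a,b,c,d] : List α).getD 1 e = b from fun _ _ _ _ _ _ => rfl,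
      show ∀ (α : Type) (a b c d e : α), ([a,b,c,d] : List α).getD 2 e = c from fun _ _ _ _ _ _ => rfl,
      show ∀ (α : Type) (a b c d e : α), ([a,b,c,d] : List α).getD 3 e = d from fun _ _ _ _ _ _ => rfl]
      at hb
    apply pvIfMin
    linarith [hb]
  · -- order [0, 2, 3, 1]
    simp only [List.getD_cons_zero,
      show ∀ (α : Type) (a b c d e : α), ([a,b,c,d] : List α).getD 1 e = b from fun _ _ _ _ _ _ => rfl,
      show ∀ (α : Type) (a b c d e : α), ([a,b,c,d] : List α).getD 2 e = c from fun _ _ _ _ _ _ => rfl,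
      show ∀ (α : Type) (a b c d e : α), ([a,b,c,d] : List α).getD 3 e = d from fun _ _ _ _ _ _ => rfl,
      show pvStarts [S.count "A", S.count "B", S.count "C", S.count "D"] [0, 2, 3, 1]
        = [0, 0 + S.count "A" + S.count "C" + S.count "D", 0 + S.count "A", 0 + S.count "A" + S.count "C"] from rfl]
    apply PySem.List.foldl_congr_mem
    intro acc2 x hx
    have hxl : x < S.length := List.mem_range.mp hx
    rw [pvRun_eq,
        PySem.List.getD_map_range _ _ _ _ (show x < 2 * S.length by omega),
        PySem.List.getD_map_range _ _ _ _ (show x + S.length < 2 * S.length by omega)]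
    rw [pvCntLookup S "A" _ _ (Nat.mod_lt _ (by omega)),
        pvCntLookup S "B" _ _ (Nat.mod_lt _ (by omega)),
        pvCntLookup S "C" _ _ (Nat.mod_lt _ (by omega)),
        pvCntLookup S "D" _ _ (Nat.mod_lt _ (by omega))]
    have hb := pvBsum S [0, 0 + S.count "A" + S.count "C" + S.count "D", 0 + S.count "A", 0 + S.count "A" + S.count "C"] x hL hxl
      (by simp only [List.getD_cons_zero]; omega)
      (by simp only [show ∀ (α : Type) (a b c d e : α), ([a,b,c,d] : List α).getD 1 e = b
            from fun _ _ _ _ _ _ => rfl]; omega)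
      (by simp only [show ∀ (α : Type) (a b c d e : α), ([a,b,c,d] : List α).getD 2 e = c
            from fun _ _ _ _ _ _ => rfl]; omega)
      (by simp only [show ∀ (α : Type) (a b c d e : α), ([a,b,c,d] : List α).getD 3 e = d
            from fun _ _ _ _ _ _ => rfl]; omega)
    simp only [List.getD_cons_zero,
      show ∀ (α : Type) (a b c d e : α), ([a,b,c,d] : List α).getD 1 e = b from fun _ _ _ _ _ _ => rfl,
      show ∀ (α : Type) (a b c d e : α), ([a,b,c,d] : List α).getD 2 e = c from fun _ _ _ _ _ _ => rfl,
      show ∀ (α : Type) (a b c d e : α), ([a,b,c,d] : List α).getD 3 e = d from fun _ _ _ _ _ _ => rfl]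
      at hb
    apply pvIfMin
    linarith [hb]
  · -- order [0, 3, 2, 1]
    simp only [List.getD_cons_zero,
      show ∀ (α : Type) (a b c d e : α), ([a,b,c,d] : List α).getD 1 e = b from fun _ _ _ _ _ _ => rfl,
      show ∀ (α : Type) (a b c d e : α), ([a,b,c,d] : List α).getD 2 e = c from fun _ _ _ _ _ _ => rfl,
      show ∀ (α : Type) (a b c d e : α), ([a,b,c,d] : List α).getD 3 e = d from fun _ _ _ _ _ _ => rfl,
      show pvStarts [S.count "A", S.count "B", S.count "C", S.count "D"] [0, 3, 2, 1]
        = [0, 0 + S.count "A" + S.count "D" + S.count "C", 0 + S.count "A" + S.count "D", 0 + S.count "A"] from rfl]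
    apply PySem.List.foldl_congr_mem
    intro acc2 x hx
    have hxl : x < S.length := List.mem_range.mp hx
    rw [pvRun_eq,
        PySem.List.getD_map_range _ _ _ _ (show x < 2 * S.length by omega),
        PySem.List.getD_map_range _ _ _ _ (show x + S.length < 2 * S.length by omega)]
    rw [pvCntLookup S "A" _ _ (Nat.mod_lt _ (by omega)),
        pvCntLookup S "B" _ _ (Nat.mod_lt _ (by omega)),
        pvCntLookup S "C" _ _ (Nat.mod_lt _ (by omega)),
        pvCntLookup S "D" _ _ (Nat.mod_lt _ (by omega))]
    have hb := pvBsum S [0, 0 + S.count "A" + S.count "D" + S.count "C", 0 + S.count "A" + S.count "D", 0 + S.count "A"] x hL hxl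
      (by simp only [List.getD_cons_zero]; omega)
      (by simp only [show ∀ (α : Type) (a b c d e : α), ([a,b,c,d] : List α).getD 1 e = b
            from fun _ _ _ _ _ _ => rfl]; omega)
      (by simp only [show ∀ (α : Type) (a b c d e : α), ([a,b,c,d] : List α).getD 2 e = c
            from fun _ _ _ _ _ _ => rfl]; omega)
      (by simp only [show ∀ (α : Type) (a b c d e : α), ([a,b,c,d] : List α).getD 3 e = d
            from fun _ _ _ _ _ _ => rfl]; omega)
    simp only [List.getD_cons_zero,
      show ∀ (α : Type) (a b c d e : α), ([a,b,c,d] : List α).getD 1 e = b from fun _ _ _ _ _ _ => rfl,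
      show ∀ (α : Type) (a b c d e : α), ([a,b,c,d] : List α).getD 2 e = c from fun _ _ _ _ _ _ => rfl,
      show ∀ (α : Type) (a b c d e : α), ([a,b,c,d] : List α).getD 3 e = d from fun _ _ _ _ _ _ => rfl]
      at hb
    apply pvIfMin
    linarith [hb]
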